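-- pv_equiv track=rewrite | github.com/JachymMracek/aplikace-SAT-solveru---set-cover | set_cover_solution.py | clauses_for_each_universe_num
-- ===== SOURCE A (Python) =====
-- def clauses_for_each_universe_num(n, S):
--
--     each_number_clauses = []
--
--     for num in range(1, n + 1):
--         number_set = []
--
--         for i in range(len(S)):
--             if num in S[i]:
--                 number_set.append(i + 1)
--
--         each_number_clauses.append(number_set)
--
--     return each_number_clauses
-- ===== SOURCE B (Python) =====
-- def clauses_for_each_universe_num(n, S):
--     pairs = [(e, i) for i, s in enumerate(S, 1) for e in dict.fromkeys(s)]
--     buckets = {}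
--     for e, i in pairs:
--         buckets.setdefault(e, []).append(i)
--     return [buckets.get(num, []) for num in range(1, n + 1)]
-- ===== Notes on version B (the rewrite author's own statement) =====
-- stated objective: faster
-- what changed: Instead of scanning every set for every number 1..n, B makes one pass over all set elements, bucketing set indices by element value in a dict, then reads the buckets off for 1..n.
import Mathlib
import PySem

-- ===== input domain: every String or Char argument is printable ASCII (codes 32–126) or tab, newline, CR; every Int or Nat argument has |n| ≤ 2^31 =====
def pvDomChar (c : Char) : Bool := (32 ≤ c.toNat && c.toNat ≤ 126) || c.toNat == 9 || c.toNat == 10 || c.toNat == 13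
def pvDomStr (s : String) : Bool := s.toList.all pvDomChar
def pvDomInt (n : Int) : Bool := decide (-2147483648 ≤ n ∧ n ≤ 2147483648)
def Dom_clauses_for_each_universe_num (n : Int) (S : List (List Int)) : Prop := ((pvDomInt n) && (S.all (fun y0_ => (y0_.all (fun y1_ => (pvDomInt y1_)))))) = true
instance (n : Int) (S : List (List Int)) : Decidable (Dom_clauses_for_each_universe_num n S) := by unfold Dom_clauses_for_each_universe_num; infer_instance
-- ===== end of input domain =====

-- B replaces A's per-number scan of every set by one pass over all set elements that buckets set indices by element value in a dict (objective: faster; measured).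


-- ===== PORT A =====
def clauses_for_each_universe_num (n : Int) (S : List (List Int)) : List (List Int) :=
  (PySem.List.pyRange 1 (n + 1) 1).foldl (fun each_number_clauses num =>
    each_number_clauses ++
      [(PySem.List.pyRange 0 (PySem.List.len S) 1).foldl (fun number_set i =>
        if num ∈ PySem.List.pyGetD S i [] then number_set ++ [i + 1] else number_set) []]) []

-- ===== PORT B =====
def clauses_for_each_universe_num_alt (n : Int) (S : List (List Int)) : List (List Int) :=
  let pairs := (PySem.List.enumerate S 1).flatMap (fun p => (PySem.List.dedup p.2).map (fun e => (e, p.1)))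
  let buckets := pairs.foldl (fun d p => d.modify p.1 [] (· ++ [p.2])) PySem.Dict.empty
  (PySem.List.pyRange 1 (n + 1) 1).map (fun num => buckets.getD num [])

-- ===== PRECONDITION & SPEC =====
def Spec_clauses_for_each_universe_num (n : Int) (S : List (List Int)) (out : List (List Int)) : Prop := out = clauses_for_each_universe_num_alt n S
instance (n : Int) (S : List (List Int)) (out : List (List Int)) : Decidable (Spec_clauses_for_each_universe_num n S out) := by unfold Spec_clauses_for_each_universe_num; infer_instance

-- ===== CLAIM (what is proved, stated in full; the proofs are below) =====
def Claim_equal_clauses_for_each_universe_num : Prop := ∀ (n : Int) (S : List (List Int)), Dom_clauses_for_each_universe_num n S → Spec_clauses_for_each_universe_num n S (clauses_for_each_universe_num n S)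

-- ===== LEMMAS AND PROOFS =====

-- [helper] enumerate S 1 reads each pair's set where A's index loop reads S[i]; bucket filtering matches A's scan.

-- A's outer loop body, isolated for readability of the proofs.
def pvInnerA (S : List (List Int)) (num : Int) : List Int :=
  (PySem.List.pyRange 0 (PySem.List.len S) 1).foldl (fun number_set i =>
    if num ∈ PySem.List.pyGetD S i [] then number_set ++ [i + 1] else number_set) []

lemma pvInnerA_eq_filter (S : List (List Int)) (num : Int) :
    pvInnerA S num
      = ((PySem.List.enumerate S 0).filter (fun q => decide (num ∈ q.2))).map (fun q => q.1 + 1) := by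
  have hE := PySem.List.enumerate_eq_map_pyRange (xs := S) (d := ([] : List Int))
  have h1 : pvInnerA S num
      = (PySem.List.enumerate S 0).foldl
          (fun number_set (p : Int × List Int) =>
            if num ∈ p.2 then number_set ++ [p.1 + 1] else number_set) [] := by
    unfold pvInnerA
    rw [hE, List.foldl_map]
  rw [h1, PySem.List.foldl_append_ite, List.nil_append]

-- the bucket read for `num` equals A's scan, for any start index.
lemma pvBucket_eq_filter (num : Int) (S : List (List Int)) : ∀ (s : Int),
    (((PySem.List.enumerate S (s + 1)).flatMap
        (fun p => (PySem.List.dedup p.2).map (fun e => (e, p.1)))).filter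
          (fun r => r.1 == num)).map (·.2)
      = ((PySem.List.enumerate S s).filter (fun q => decide (num ∈ q.2))).map (fun q => q.1 + 1) := by
  induction S with
  | nil => intro s; simp [PySem.List.enumerate_nil]
  | cons x xs ih =>
    intro s
    have hx : (((PySem.List.dedup x).map (fun e => (e, s + 1))).filter
          (fun r => r.1 == num)).map (·.2)
        = if num ∈ x then [s + 1] else [] := by
      rw [List.filter_map]
      have hcomp : ((fun r : Int × Int => r.1 == num) ∘ (fun e : Int => (e, s + 1)))
          = (fun e => e == num) := rfl
      rw [hcomp, List.filter_beq, List.map_map]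
      by_cases hmem : num ∈ x
      · have hc1 : List.count num (PySem.List.dedup x) = 1 := by
          have hle := List.nodup_iff_count_le_one.mp (PySem.List.nodup_dedup x) num
          have hpos := List.count_pos_iff.mpr ((PySem.List.mem_dedup x num).mpr hmem)
          omega
        rw [hc1]
        simp [hmem]
      · have hc0 : List.count num (PySem.List.dedup x) = 0 :=
          List.count_eq_zero.mpr (fun h => hmem ((PySem.List.mem_dedup x num).mp h))
        rw [hc0]
        simp [hmem]
    simp only [PySem.List.enumerate_cons, List.flatMap_cons, List.filter_append,
      List.map_append, List.filter_cons]
    rw [hx, ih (s + 1)]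
    by_cases hmem : num ∈ x
    · simp [hmem]
    · simp [hmem]

lemma pvPointwise (S : List (List Int)) (num : Int) :
    pvInnerA S num
      = (((PySem.List.enumerate S 1).flatMap
            (fun p => (PySem.List.dedup p.2).map (fun e => (e, p.1)))).foldl
          (fun d p => d.modify p.1 [] (· ++ [p.2])) PySem.Dict.empty).getD num [] := by
  rw [PySem.Dict.getD_foldl_modify_append, PySem.Dict.getD_empty, List.nil_append]
  rw [pvInnerA_eq_filter]
  have h := pvBucket_eq_filter num S 0
  rw [zero_add] at h
  exact h.symm


-- ===== VERDICT (by name: the statement is the Claim_ definition above) =====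
theorem clauses_for_each_universe_num_spec : Claim_equal_clauses_for_each_universe_num := by
  intro n S _
  unfold Spec_clauses_for_each_universe_num
  show clauses_for_each_universe_num n S = clauses_for_each_universe_num_alt n S
  unfold clauses_for_each_universe_num clauses_for_each_universe_num_alt
  rw [PySem.List.foldl_append_singleton_eq_map, List.nil_append]
  exact List.map_congr_left (fun num _ => pvPointwise S num)
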